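-- pv_equiv track=rewrite | github.com/ShepherdCode/Soars2021 | SimTools/KmerTools.py | harvest_counts_from_K
-- ===== SOURCE A (Python) =====
-- def harvest_counts_from_K(counts,max_K):
--     '''
--     Implement the Harvester algorithm.
--     This is more efficient than update_count_upto_K().
--     Given a data structure containing counts for K=max_K only,
--     backfill the counts for all smaller values of K.
--     Call this after calling update_count_one_K(tail=True)
--     on every sequence in your collection with K=max_K.
--     '''
--     for kmer in counts.keys():
--         klen = len(kmer)
--         kcnt = counts[kmer]
--         if klen==max_K and kcnt>0:
--             for i in range(1,klen):
--                 prefix = kmer[:i]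
--                 counts[prefix] += kcnt
--     return counts
-- ===== SOURCE B (Python) =====
-- def harvest_counts_from_K(counts, max_K):
--     # Level-by-level delta propagation: collect each max_K kmer's count into its
--     # (max_K-1)-prefix, then push the deltas down one level at a time.
--     # Like the original, this updates the counts dict in place and returns it.
--     delta = {}
--     for kmer, kcnt in counts.items():
--         if len(kmer) == max_K and kcnt > 0:
--             p = kmer[:-1]
--             delta[p] = delta.get(p, 0) + kcnt
--     L = max_K - 1
--     while L >= 1 and delta:
--         nxt = {}
--         for p, d in delta.items():
--             counts[p] += d
--             if L > 1:
--                 q = p[:-1]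
--                 nxt[q] = nxt.get(q, 0) + d
--         delta = nxt
--         L -= 1
--     return counts
-- ===== Notes on version B (the rewrite author's own statement) =====
-- stated objective: alternative
-- what changed: Instead of slicing every proper prefix of each qualifying max_K kmer and bumping counts per prefix, B collects each qualifying kmer's count into a delta dict keyed by its (max_K-1)-prefix and then propagates the deltas down one level at a time, adding each level's delta into counts and re-keying it by dropping the last character.
import Mathlib
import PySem

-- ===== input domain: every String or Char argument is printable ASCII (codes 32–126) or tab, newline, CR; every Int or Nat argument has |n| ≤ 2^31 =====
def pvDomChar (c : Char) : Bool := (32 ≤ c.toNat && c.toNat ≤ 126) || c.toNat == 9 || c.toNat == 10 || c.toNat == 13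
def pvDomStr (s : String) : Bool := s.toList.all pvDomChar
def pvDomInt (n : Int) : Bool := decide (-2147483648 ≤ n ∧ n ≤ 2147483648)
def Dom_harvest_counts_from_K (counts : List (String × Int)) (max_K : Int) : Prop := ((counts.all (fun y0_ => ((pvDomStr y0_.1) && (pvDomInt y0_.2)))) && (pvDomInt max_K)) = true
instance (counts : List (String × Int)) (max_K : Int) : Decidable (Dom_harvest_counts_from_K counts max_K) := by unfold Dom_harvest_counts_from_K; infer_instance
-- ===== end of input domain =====

-- B replaces A's per-kmer slicing of every proper prefix by a level-by-level downward
-- propagation of a delta dict (alternative decomposition, similar cost). Both the Python A and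
-- the Python B update `counts` in place and return it; the theorems are about the return value.

-- ===== PORT A =====
-- `counts[prefix] += kcnt` is Dict.modify with default 0; Python raises KeyError when the
-- prefix key is missing — exactly those inputs are excluded by Pre_hharvest below.
def harvest_counts_from_K (counts : List (String × Int)) (max_K : Int) : List (String × Int) :=
  let d0 : PySem.Dict String Int := PySem.Dict.mk counts
  (d0.keys.foldl (fun d kmer =>
      let klen : Int := PySem.Str.len kmer
      let kcnt : Int := d.getD kmer 0
      if klen = max_K ∧ 0 < kcnt then
        (PySem.List.pyRange 1 klen 1).foldl
          (fun d i => d.modify (PySem.Str.slice kmer none (some i)) 0 (· + kcnt)) d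
      else d) d0).items

-- ===== PORT B =====
-- one level of B's while-loop: fuel n is the current level L; `L > 1` is `0 < n` at fuel n = L
def pvBLoop (cnt delta : PySem.Dict String Int) : Nat → PySem.Dict String Int
  | 0 => cnt
  | Nat.succ n =>
      if delta.items.isEmpty then cnt else
      let st := delta.items.foldl
        (fun (st : PySem.Dict String Int × PySem.Dict String Int) p =>
          (st.1.modify p.1 0 (· + p.2),
           if 0 < n then
             st.2.insert (PySem.Str.slice p.1 none (some (-1)))
               (st.2.getD (PySem.Str.slice p.1 none (some (-1))) 0 + p.2)
           else st.2))
        (cnt, PySem.Dict.empty)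
      pvBLoop st.1 st.2 n

def harvest_counts_from_K_alt (counts : List (String × Int)) (max_K : Int) : List (String × Int) :=
  let d0 : PySem.Dict String Int := PySem.Dict.mk counts
  let delta := d0.items.foldl
    (fun dl p =>
      if PySem.Str.len p.1 = max_K ∧ 0 < p.2 then
        dl.insert (PySem.Str.slice p.1 none (some (-1)))
          (dl.getD (PySem.Str.slice p.1 none (some (-1))) 0 + p.2)
      else dl) PySem.Dict.empty
  (pvBLoop d0 delta (max_K - 1).toNat).items

-- ===== PRECONDITION & SPEC =====
-- Pre_ excludes (a) assoc lists with duplicate keys, which no Python dict input can produce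
-- (the argument is a dict), and (b) inputs where some proper prefix of a qualifying max_K kmer
-- is not a key, on which Python A raises KeyError.
def Pre_harvest_counts_from_K (counts : List (String × Int)) (max_K : Int) : Prop :=
  (counts.map Prod.fst).Nodup ∧
  ∀ p ∈ counts, (PySem.Str.len p.1 = max_K ∧ 0 < p.2) →
    ∀ i ∈ PySem.List.pyRange 1 (PySem.Str.len p.1) 1,
      PySem.Str.slice p.1 none (some i) ∈ counts.map Prod.fst
instance (counts : List (String × Int)) (max_K : Int) : Decidable (Pre_harvest_counts_from_K counts max_K) := by unfold Pre_harvest_counts_from_K; infer_instance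

def pvWitness_harvest_counts_from_K : (List (String × Int)) × Int := ([("ab", 2), ("a", 0)], 2)

def Spec_harvest_counts_from_K (counts : List (String × Int)) (max_K : Int) (out : List (String × Int)) : Prop := out = harvest_counts_from_K_alt counts max_K
instance (counts : List (String × Int)) (max_K : Int) (out : List (String × Int)) : Decidable (Spec_harvest_counts_from_K counts max_K out) := by unfold Spec_harvest_counts_from_K; infer_instance

-- ===== CLAIM (what is proved, stated in full; the proofs are below) =====
def Claim_equal_harvest_counts_from_K : Prop := ∀ (counts : List (String × Int)) (max_K : Int), Dom_harvest_counts_from_K counts max_K → Pre_harvest_counts_from_K counts max_K → Spec_harvest_counts_from_K counts max_K (harvest_counts_from_K counts max_K)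

-- ===== LEMMAS AND PROOFS =====

-- prefix of length n, as a string
def pvTk (s : String) (n : Nat) : String := String.ofList (s.toList.take n)

-- weighted sum of l's entries whose key maps to q under f
def pvSumBy (f : String → String) (l : List (String × Int)) (q : String) : Int :=
  (l.map (fun p => if f p.1 = q then p.2 else 0)).sum

-- total that B's loop with fuel n adds at key q (Q = the qualifying entries)
def pvFB (Q : List (String × Int)) : Nat → String → Int
  | 0, _ => 0
  | Nat.succ n, q => pvSumBy (fun s => pvTk s (n + 1)) Q q + pvFB Q n q

-- per-kmer amount A adds at key q
def pvTA (counts : List (String × Int)) (max_K : Int) (k q : String) : Int :=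
  if PySem.Str.len k = max_K ∧ 0 < (PySem.Dict.mk counts).getD k 0 then
    ((PySem.List.pyRange 1 (PySem.Str.len k) 1).map
      (fun i => if PySem.Str.slice k none (some i) = q then (PySem.Dict.mk counts).getD k 0 else 0)).sum
  else 0

-- A's inner sums over levels 1..n, per qualifying entry
def pvG (Q : List (String × Int)) (n : Nat) (q : String) : Int :=
  (Q.map (fun p => ((PySem.List.pyRange 1 ((n : Int) + 1) 1).map
    (fun i => if PySem.Str.slice p.1 none (some i) = q then p.2 else 0)).sum)).sum

lemma pv_slice_tk (s : String) (i : Int) (h : 0 ≤ i) :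
    PySem.Str.slice s none (some i) = pvTk s i.toNat := by
  have h1 : PySem.Str.slice s none (some i)
      = String.ofList (PySem.Chars.slice s.toList none (some i)) := rfl
  rw [h1, pvTk]
  rw [show PySem.Chars.slice s.toList none (some i) = PySem.List.slice s.toList none (some i) from rfl,
    PySem.List.slice_to s.toList h]

lemma pv_slice_dropLast (s : String) :
    PySem.Str.slice s none (some (-1)) = String.ofList s.toList.dropLast := by
  have h1 : PySem.Str.slice s none (some (-1))
      = String.ofList (PySem.Chars.slice s.toList none (some (-1))) := rfl
  rw [h1, show PySem.Chars.slice s.toList none (some (-1)) = PySem.List.slice s.toList none (some (-1)) from rfl,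
    PySem.List.slice_to_neg_one]

lemma pv_dropLast_tk (s : String) (n : Nat) (h : n + 1 < s.toList.length) :
    String.ofList (pvTk s (n + 1)).toList.dropLast = pvTk s n := by
  rw [pvTk, String.toList_ofList, List.dropLast_take (by omega), pvTk]
  norm_num

lemma pv_len_slice (k : String) (i : Int) (h1 : 1 ≤ i) (h2 : i < PySem.Str.len k) :
    PySem.Str.len (PySem.Str.slice k none (some i)) = i := by
  rw [pv_slice_tk k i (by omega), pvTk, PySem.Str.len_eq, String.toList_ofList, List.length_take]
  rw [PySem.Str.len_eq] at h2
  omega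

lemma pv_pyRange_nil (b : Int) (h : b ≤ 1) : PySem.List.pyRange 1 b 1 = [] := by
  refine List.eq_nil_iff_forall_not_mem.2 (fun x hx => ?_)
  have := PySem.List.mem_pyRange_one.1 hx; omega

lemma pv_sum_delta : ∀ (K : List String), K.Nodup → ∀ (h : String → Int) (a : String),
    (K.map (fun k => if k = a then h k else 0)).sum = if a ∈ K then h a else 0 := by
  intro K
  induction K with
  | nil => intro _ h a; simp
  | cons x K ih =>
    intro hnd h a
    obtain ⟨hx, hK⟩ := List.nodup_cons.1 hnd
    simp only [List.map_cons, List.sum_cons]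
    rw [ih hK]
    by_cases hxa : x = a
    · subst hxa
      rw [if_pos rfl, if_neg hx, if_pos (List.mem_cons_self)]
      omega
    · rw [if_neg hxa]
      simp only [List.mem_cons]
      rw [if_congr (or_iff_right (fun h : a = x => hxa h.symm)) rfl rfl]
      omega

lemma pv_sumBy_enum (f : String → String) (q : String)
    (K : List String) (hK : K.Nodup) :
    ∀ (l : List (String × Int)), (∀ p ∈ l, p.1 ∈ K) →
    pvSumBy f l q = (K.map (fun k => if f k = q then pvSumBy id l k else 0)).sum := by
  intro l
  induction l with
  | nil => intro _; simp [pvSumBy]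
  | cons p tl ih =>
    intro hsub
    have hp : p.1 ∈ K := hsub p (by simp)
    have htl : ∀ r ∈ tl, r.1 ∈ K := fun r hr => hsub r (by simp [hr])
    have hrw : (K.map (fun k => if f k = q then pvSumBy id (p :: tl) k else 0)).sum
        = (K.map (fun k => (if k = p.1 then (if f k = q then p.2 else 0) else 0)
            + (if f k = q then pvSumBy id tl k else 0))).sum := by
      refine congrArg List.sum (List.map_congr_left ?_)
      intro k _
      have hsplit : pvSumBy id (p :: tl) k = (if p.1 = k then p.2 else 0) + pvSumBy id tl k := by
        simp [pvSumBy]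
      rw [hsplit]
      by_cases h2 : k = p.1
      · subst h2
        by_cases h1 : f p.1 = q <;> simp [h1]
      · have h2' : ¬ p.1 = k := fun hh => h2 hh.symm
        by_cases h1 : f k = q <;> simp [h1, h2, h2']
    rw [hrw, PySem.List.sum_map_add_int, pv_sum_delta K hK _ p.1, if_pos hp, ← ih htl]
    simp only [pvSumBy, List.map_cons, List.sum_cons]

lemma pv_transport (f : String → String) (l1 l2 : List (String × Int))
    (h : ∀ k, pvSumBy id l1 k = pvSumBy id l2 k) (q : String) :
    pvSumBy f l1 q = pvSumBy f l2 q := by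
  have hK : (PySem.Set.ofList (l1.map Prod.fst ++ l2.map Prod.fst)).Nodup :=
    PySem.Set.nodup_ofList _
  have h1 : ∀ p ∈ l1, p.1 ∈ PySem.Set.ofList (l1.map Prod.fst ++ l2.map Prod.fst) := by
    intro p hp
    rw [PySem.Set.mem_ofList]
    exact List.mem_append_left _ (List.mem_map_of_mem hp)
  have h2 : ∀ p ∈ l2, p.1 ∈ PySem.Set.ofList (l1.map Prod.fst ++ l2.map Prod.fst) := by
    intro p hp
    rw [PySem.Set.mem_ofList]
    exact List.mem_append_right _ (List.mem_map_of_mem hp)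
  rw [pv_sumBy_enum f q _ hK l1 h1, pv_sumBy_enum f q _ hK l2 h2]
  exact congrArg List.sum (List.map_congr_left (fun k _ => by rw [h k]))

lemma pv_sumBy_map (f : String → String) (Q : List (String × Int)) (q : String) :
    pvSumBy id (Q.map (fun p => (f p.1, p.2))) q = pvSumBy f Q q := by
  simp [pvSumBy, List.map_map, Function.comp_def]

-- value of a bump-fold (d[key a] = d.get(key a, 0) + amt a, over l)
lemma pv_bump_getD {β : Type} (l : List β) (key : β → String) (amt : β → Int) :
    ∀ (d : PySem.Dict String Int) (q : String),
    (l.foldl (fun d a => d.insert (key a) (d.getD (key a) 0 + amt a)) d).getD q 0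
      = d.getD q 0 + (l.map (fun a => if key a = q then amt a else 0)).sum := by
  induction l with
  | nil => simp
  | cons a l ih =>
    intro d q
    simp only [List.foldl_cons, List.map_cons, List.sum_cons]
    rw [ih, PySem.Dict.getD_insert]
    by_cases h : q = key a
    · subst h; rw [if_pos rfl, if_pos rfl]; omega
    · rw [if_neg h, if_neg (fun hh : key a = q => h hh.symm)]; omega

-- keys of a bump-fold when every key is already present: unchanged (as a list)
lemma pv_bump_keys_of_mem {β : Type} (l : List β) (key : β → String) (amt : β → Int) :
    ∀ (d : PySem.Dict String Int), (∀ a ∈ l, key a ∈ d.keys) →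
    (l.foldl (fun d a => d.insert (key a) (d.getD (key a) 0 + amt a)) d).keys = d.keys := by
  induction l with
  | nil => intro d _; rfl
  | cons a l ih =>
    intro d hmem
    have hc : d.contains (key a) = true :=
      (PySem.Dict.contains_iff_mem_keys d (key a)).2 (hmem a (by simp))
    have hk : (d.insert (key a) (d.getD (key a) 0 + amt a)).keys = d.keys :=
      PySem.Dict.keys_insert_of_contains d _ hc
    rw [List.foldl_cons, ih _ (by intro b hb; rw [hk]; exact hmem b (by simp [hb])), hk]

-- membership in the keys of a bump-fold, in general
lemma pv_bump_keys_mem {β : Type} (l : List β) (key : β → String) (amt : β → Int) :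
    ∀ (d : PySem.Dict String Int) (x : String),
    (x ∈ (l.foldl (fun d a => d.insert (key a) (d.getD (key a) 0 + amt a)) d).keys
      ↔ x ∈ d.keys ∨ ∃ a ∈ l, x = key a) := by
  induction l with
  | nil => simp
  | cons a l ih =>
    intro d x
    rw [List.foldl_cons, ih, PySem.Dict.mem_keys_insert]
    constructor
    · rintro ((rfl | h) | ⟨b, hb, rfl⟩)
      · exact Or.inr ⟨a, by simp⟩
      · exact Or.inl h
      · exact Or.inr ⟨b, by simp [hb]⟩
    · rintro (h | ⟨b, hb, rfl⟩)
      · exact Or.inl (Or.inr h)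
      · rcases List.mem_cons.1 hb with rfl | hb
        · exact Or.inl (Or.inl rfl)
        · exact Or.inr ⟨b, hb, rfl⟩

lemma pv_sumW_items (d : PySem.Dict String Int) (hnd : d.keys.Nodup) (q : String) :
    pvSumBy id d.items q = d.getD q 0 := by
  unfold pvSumBy
  rw [PySem.Dict.items_eq_map_keys d hnd 0, List.map_map]
  have : ((fun p : String × Int => if id p.1 = q then p.2 else 0) ∘ fun k => (k, d.getD k 0))
      = fun k => if k = q then d.getD k 0 else 0 := by
    funext k; simp [id]
  rw [this, pv_sum_delta d.keys hnd _ q]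
  by_cases h : q ∈ d.keys
  · rw [if_pos h]
  · rw [if_neg h, PySem.Dict.getD_of_not_contains]
    simp [← Bool.not_eq_true, PySem.Dict.contains_iff_mem_keys, h]

-- sum over a filtered list = guarded sum over the whole list
lemma pv_sum_filter {β : Type} (pred : β → Bool) (f : β → Int) :
    ∀ (l : List β), ((l.filter pred).map f).sum = (l.map (fun p => if pred p = true then f p else 0)).sum := by
  intro l
  induction l with
  | nil => simp
  | cons p tl ih =>
    by_cases h : pred p = true
    · rw [List.filter_cons_of_pos h, List.map_cons, List.sum_cons, ih, List.map_cons,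
        List.sum_cons, if_pos h]
    · rw [List.filter_cons_of_neg (by simp [h]), ih, List.map_cons, List.sum_cons,
        if_neg h, zero_add]

-- membership facts about qualifying entries
lemma pv_Q_mem (counts : List (String × Int)) (max_K : Int) (p : String × Int)
    (hp : p ∈ counts.filter (fun p => decide (PySem.Str.len p.1 = max_K ∧ 0 < p.2))) :
    p ∈ counts ∧ PySem.Str.len p.1 = max_K ∧ 0 < p.2 := by
  have h1 := List.mem_filter.1 hp
  exact ⟨h1.1, by simpa using h1.2⟩

lemma pv_tk_mem (counts : List (String × Int)) (max_K : Int)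
    (hpre : ∀ p ∈ counts, (PySem.Str.len p.1 = max_K ∧ 0 < p.2) →
      ∀ i ∈ PySem.List.pyRange 1 (PySem.Str.len p.1) 1,
        PySem.Str.slice p.1 none (some i) ∈ counts.map Prod.fst)
    (p : String × Int)
    (hp : p ∈ counts.filter (fun p => decide (PySem.Str.len p.1 = max_K ∧ 0 < p.2)))
    (m : Nat) (h1 : 1 ≤ m) (h2 : (m : Int) ≤ max_K - 1) :
    pvTk p.1 m ∈ counts.map Prod.fst := by
  obtain ⟨hmem, hlen, hpos⟩ := pv_Q_mem counts max_K p hp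
  have hm : ((m : Int)) ∈ PySem.List.pyRange 1 (PySem.Str.len p.1) 1 := by
    rw [PySem.List.mem_pyRange_one, hlen]
    omega
  have := hpre p hmem ⟨hlen, hpos⟩ (m : Int) hm
  rwa [pv_slice_tk p.1 (m : Int) (by omega), Int.toNat_natCast] at this

lemma pvFB_nil : ∀ (n : Nat) (q : String), pvFB [] n q = 0 := by
  intro n
  induction n with
  | zero => intro q; rfl
  | succ n ih =>
    intro q
    simp only [pvFB, ih q]
    simp [pvSumBy]

-- ===== A-side characterisation =====

lemma pv_aOuter (counts : List (String × Int)) (max_K : Int)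
    (hnd : (counts.map Prod.fst).Nodup)
    (hpre : ∀ p ∈ counts, (PySem.Str.len p.1 = max_K ∧ 0 < p.2) →
      ∀ i ∈ PySem.List.pyRange 1 (PySem.Str.len p.1) 1,
        PySem.Str.slice p.1 none (some i) ∈ counts.map Prod.fst) :
    ∀ (ks : List String) (d : PySem.Dict String Int) (g : String → Int),
      (∀ k ∈ ks, k ∈ (PySem.Dict.mk counts).keys) →
      d.keys = (PySem.Dict.mk counts).keys →
      (∀ q, d.getD q 0 = (PySem.Dict.mk counts).getD q 0 + g q) →
      (∀ q, PySem.Str.len q = max_K → g q = 0) →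
      ((ks.foldl (fun d kmer =>
          if PySem.Str.len kmer = max_K ∧ 0 < d.getD kmer 0 then
            (PySem.List.pyRange 1 (PySem.Str.len kmer) 1).foldl
              (fun dd i => dd.modify (PySem.Str.slice kmer none (some i)) 0 (· + d.getD kmer 0)) d
          else d) d).keys = (PySem.Dict.mk counts).keys ∧
      ∀ q, (ks.foldl (fun d kmer =>
          if PySem.Str.len kmer = max_K ∧ 0 < d.getD kmer 0 then
            (PySem.List.pyRange 1 (PySem.Str.len kmer) 1).foldl
              (fun dd i => dd.modify (PySem.Str.slice kmer none (some i)) 0 (· + d.getD kmer 0)) d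
          else d) d).getD q 0
        = (PySem.Dict.mk counts).getD q 0 + g q + (ks.map (fun k => pvTA counts max_K k q)).sum) := by
  intro ks
  induction ks with
  | nil =>
    intro d g _ hkeys hd _
    refine ⟨hkeys, fun q => ?_⟩
    simp [hd q]
  | cons k ks ih =>
    intro d g hks hkeys hd hg
    have hkmem : k ∈ (PySem.Dict.mk counts).keys := hks k (by simp)
    have hkskeys : ∀ x ∈ ks, x ∈ (PySem.Dict.mk counts).keys := fun x hx => hks x (by simp [hx])
    simp only [List.foldl_cons, List.map_cons, List.sum_cons]
    by_cases hc : PySem.Str.len k = max_K ∧ 0 < d.getD k 0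
    · -- qualifying: the inner loop runs
      have hg0 : g k = 0 := hg k hc.1
      have hval : d.getD k 0 = (PySem.Dict.mk counts).getD k 0 := by rw [hd k, hg0, add_zero]
      -- the entry (k, value) is in counts
      have hkc : (k, (PySem.Dict.mk counts).getD k 0) ∈ counts := by
        rw [PySem.Dict.keys_mk] at hkmem
        obtain ⟨p, hpmem, hpfst⟩ := List.mem_map.1 hkmem
        have hgd : (PySem.Dict.mk counts).getD p.1 0 = p.2 :=
          PySem.Dict.getD_of_mem_items (PySem.Dict.mk counts) hpmem
            (by rw [PySem.Dict.keys_mk]; exact hnd) 0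
        have heq : (k, (PySem.Dict.mk counts).getD k 0) = p := by
          subst hpfst
          rw [hgd]
        rw [heq]
        exact hpmem
      have hqual : PySem.Str.len k = max_K ∧ 0 < (PySem.Dict.mk counts).getD k 0 :=
        ⟨hc.1, hval ▸ hc.2⟩
      -- the inner fold is a bump fold
      have hinner_getD := pv_bump_getD (PySem.List.pyRange 1 (PySem.Str.len k) 1)
        (fun i => PySem.Str.slice k none (some i)) (fun _ => d.getD k 0)
      have hinner_keys := pv_bump_keys_of_mem (PySem.List.pyRange 1 (PySem.Str.len k) 1)
        (fun i => PySem.Str.slice k none (some i)) (fun _ => d.getD k 0)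
      have hmemk : ∀ i ∈ PySem.List.pyRange 1 (PySem.Str.len k) 1,
          PySem.Str.slice k none (some i) ∈ d.keys := by
        intro i hi
        rw [hkeys, PySem.Dict.keys_mk]
        exact hpre (k, (PySem.Dict.mk counts).getD k 0) hkc hqual i hi
      rw [if_pos hc]
      have hstep : ((PySem.List.pyRange 1 (PySem.Str.len k) 1).foldl
          (fun dd i => dd.modify (PySem.Str.slice k none (some i)) 0 (· + d.getD k 0)) d)
          = ((PySem.List.pyRange 1 (PySem.Str.len k) 1).foldl
          (fun dd i => dd.insert (PySem.Str.slice k none (some i))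
            (dd.getD (PySem.Str.slice k none (some i)) 0 + d.getD k 0)) d) := rfl
      rw [hstep]
      have hTAval : ∀ q, pvTA counts max_K k q = ((PySem.List.pyRange 1 (PySem.Str.len k) 1).map
          (fun i => if PySem.Str.slice k none (some i) = q
            then (PySem.Dict.mk counts).getD k 0 else 0)).sum := by
        intro q
        rw [pvTA, if_pos hqual]
      have hih := ih _ (fun q => g q + pvTA counts max_K k q) hkskeys
        (by rw [hinner_keys d hmemk, hkeys])
        (by
          intro q
          beta_reduce
          rw [hinner_getD d q, hd q, hval, ← hTAval q]
          omega)
        (by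
          intro q hq
          beta_reduce
          have hTA : pvTA counts max_K k q = 0 := by
            rw [hTAval q]
            have hz : ∀ i ∈ PySem.List.pyRange 1 (PySem.Str.len k) 1,
                (if PySem.Str.slice k none (some i) = q
                  then (PySem.Dict.mk counts).getD k 0 else 0) = 0 := by
              intro i hi
              obtain ⟨hi1, hi2⟩ := PySem.List.mem_pyRange_one.1 hi
              rw [if_neg]
              intro hsq
              have hls := pv_len_slice k i hi1 hi2
              rw [hsq, hq] at hls
              rw [hc.1] at hi2
              omega
            rw [List.map_congr_left (fun i hi => hz i hi)]
            simp
          rw [hg q hq, hTA]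
          omega
        )
      obtain ⟨ha, hb⟩ := hih
      refine ⟨ha, fun q => ?_⟩
      have hbq := hb q
      beta_reduce at hbq
      rw [hbq]
      omega
    · -- not qualifying: no change
      rw [if_neg hc]
      have hTA : ∀ q, pvTA counts max_K k q = 0 := by
        intro q
        rw [pvTA, if_neg]
        intro hqual
        exact hc ⟨hqual.1, by
          have hg0 : g k = 0 := hg k hqual.1
          rw [hd k, hg0, add_zero]; exact hqual.2⟩
      refine (ih d g hkskeys hkeys hd hg).imp id (fun hh q => ?_)
      rw [hh q, hTA q]
      omega

-- ===== B-side characterisation =====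

lemma pv_bloop (counts : List (String × Int)) (max_K : Int)
    (_hnd : (counts.map Prod.fst).Nodup)
    (hpre : ∀ p ∈ counts, (PySem.Str.len p.1 = max_K ∧ 0 < p.2) →
      ∀ i ∈ PySem.List.pyRange 1 (PySem.Str.len p.1) 1,
        PySem.Str.slice p.1 none (some i) ∈ counts.map Prod.fst) :
    ∀ (n : Nat) (d delta : PySem.Dict String Int) (g : String → Int),
      ((n : Int) ≤ max_K - 1) →
      d.keys = (PySem.Dict.mk counts).keys →
      (∀ q, d.getD q 0 = (PySem.Dict.mk counts).getD q 0 + g q) →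
      (∀ q, delta.getD q 0 = pvSumBy (fun s => pvTk s n)
        (counts.filter (fun p => decide (PySem.Str.len p.1 = max_K ∧ 0 < p.2))) q) →
      delta.keys.Nodup →
      (∀ x ∈ delta.keys, ∃ p ∈ counts.filter (fun p => decide (PySem.Str.len p.1 = max_K ∧ 0 < p.2)),
          x = pvTk p.1 n) →
      (pvBLoop d delta n).keys = (PySem.Dict.mk counts).keys ∧
      ∀ q, (pvBLoop d delta n).getD q 0 = (PySem.Dict.mk counts).getD q 0 + g q
        + pvFB (counts.filter (fun p => decide (PySem.Str.len p.1 = max_K ∧ 0 < p.2))) n q := by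
  intro n
  induction n with
  | zero =>
    intro d delta g _ hkeys hd _ _ _
    refine ⟨hkeys, fun q => ?_⟩
    simp only [pvBLoop, pvFB]
    rw [hd q]
    omega
  | succ n ih =>
    intro d delta g hn hkeys hd hdelta hndd hkd
    by_cases hde : delta.items.isEmpty = true
    · -- the while-loop guard `and delta` fails: there are no qualifying entries at all
      have hdeq : delta = PySem.Dict.empty := by
        apply PySem.Dict.ext
        rw [List.isEmpty_iff.1 hde]
        rfl
      have hQnil : counts.filter (fun p => decide (PySem.Str.len p.1 = max_K ∧ 0 < p.2)) = [] := by
        by_contra hne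
        obtain ⟨p, hp⟩ := List.exists_mem_of_ne_nil _ hne
        have h1 := hdelta (pvTk p.1 (n+1))
        rw [hdeq, PySem.Dict.getD_empty] at h1
        have hpos := (pv_Q_mem counts max_K p hp).2.2
        have hle : p.2 ≤ pvSumBy (fun s => pvTk s (n+1))
            (counts.filter (fun p => decide (PySem.Str.len p.1 = max_K ∧ 0 < p.2)))
            (pvTk p.1 (n+1)) := by
          unfold pvSumBy
          have hmval : (if pvTk p.1 (n+1) = pvTk p.1 (n+1) then p.2 else 0) = p.2 := if_pos rfl
          refine le_trans (le_of_eq hmval.symm) (List.single_le_sum ?_ _ (List.mem_map_of_mem hp))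
          intro x hx
          rcases List.mem_map.1 hx with ⟨r, hr, rfl⟩
          by_cases hcr : pvTk r.1 (n+1) = pvTk p.1 (n+1)
          · rw [if_pos hcr]
            exact le_of_lt (pv_Q_mem counts max_K r hr).2.2
          · rw [if_neg hcr]
        omega
      have hres : pvBLoop d delta (n+1) = d := by
        simp only [pvBLoop, hde]
        rfl
      refine ⟨by rw [hres, hkeys], fun q => ?_⟩
      rw [hres, hd q, hQnil, pvFB_nil]
      omega
    · have hde' : delta.items.isEmpty = false := by
        rwa [Bool.not_eq_true] at hde
      simp only [pvBLoop, hde', Bool.false_eq_true, if_false]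
      rw [PySem.List.foldl_prod_mk
      (fun (s : PySem.Dict String Int) (p : String × Int) => s.modify p.1 0 (· + p.2))
      (fun (s : PySem.Dict String Int) (p : String × Int) => if 0 < n then
        s.insert (PySem.Str.slice p.1 none (some (-1)))
          (s.getD (PySem.Str.slice p.1 none (some (-1))) 0 + p.2)
        else s)]
      -- the counts part
      have hkeysdelta : ∀ p ∈ delta.items, p.1 ∈ d.keys := by
        intro p hp
        have h1 : p.1 ∈ delta.keys := List.mem_map_of_mem hp
        obtain ⟨r, hr, hx⟩ := hkd p.1 h1
        rw [hkeys, PySem.Dict.keys_mk, hx]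
        exact pv_tk_mem counts max_K hpre r hr (n+1) (by omega) (by push_cast; omega)
      have hstep1 : (delta.items.foldl
          (fun (s : PySem.Dict String Int) (p : String × Int) => s.modify p.1 0 (· + p.2)) d)
          = (delta.items.foldl
          (fun (s : PySem.Dict String Int) (p : String × Int) =>
            s.insert p.1 (s.getD p.1 0 + p.2)) d) := rfl
      have hd' : ∀ q, (delta.items.foldl
          (fun (s : PySem.Dict String Int) (p : String × Int) => s.modify p.1 0 (· + p.2)) d).getD q 0
          = (PySem.Dict.mk counts).getD q 0 + g q
            + pvSumBy (fun s => pvTk s (n+1))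
              (counts.filter (fun p => decide (PySem.Str.len p.1 = max_K ∧ 0 < p.2))) q := by
        intro q
        rw [hstep1, pv_bump_getD delta.items (fun p => p.1) (fun p => p.2) d q, hd q]
        have hsw : (delta.items.map (fun p => if p.1 = q then p.2 else 0)).sum
            = pvSumBy id delta.items q := rfl
        rw [hsw, pv_sumW_items delta hndd q, hdelta q]
      have hkeys' : (delta.items.foldl
          (fun (s : PySem.Dict String Int) (p : String × Int) => s.modify p.1 0 (· + p.2)) d).keys
          = (PySem.Dict.mk counts).keys := by
        rw [hstep1, pv_bump_keys_of_mem delta.items (fun p => p.1) (fun p => p.2) d hkeysdelta, hkeys]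
      by_cases hn0 : 0 < n
      · -- an inner level remains: build the next delta
        simp only [if_pos hn0]
        have hQlen : ∀ p ∈ counts.filter (fun p => decide (PySem.Str.len p.1 = max_K ∧ 0 < p.2)),
            ((p.1.toList.length : Int)) = max_K := by
          intro p hp
          have := (pv_Q_mem counts max_K p hp).2.1
          rwa [PySem.Str.len_eq] at this
        have hdl : ∀ p ∈ counts.filter (fun p => decide (PySem.Str.len p.1 = max_K ∧ 0 < p.2)),
            PySem.Str.slice (pvTk p.1 (n+1)) none (some (-1)) = pvTk p.1 n := by
          intro p hp
          rw [pv_slice_dropLast]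
          exact pv_dropLast_tk p.1 n (by have := hQlen p hp; push_cast at hn ⊢; omega)
        have hdelta' : ∀ q, (delta.items.foldl
            (fun (s : PySem.Dict String Int) (p : String × Int) =>
              s.insert (PySem.Str.slice p.1 none (some (-1)))
                (s.getD (PySem.Str.slice p.1 none (some (-1))) 0 + p.2)) PySem.Dict.empty).getD q 0
            = pvSumBy (fun s => pvTk s n)
              (counts.filter (fun p => decide (PySem.Str.len p.1 = max_K ∧ 0 < p.2))) q := by
          intro q
          rw [pv_bump_getD delta.items (fun p => PySem.Str.slice p.1 none (some (-1)))
            (fun p => p.2) PySem.Dict.empty q, PySem.Dict.getD_empty, zero_add]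
          have hsw : (delta.items.map (fun p =>
              if PySem.Str.slice p.1 none (some (-1)) = q then p.2 else 0)).sum
              = pvSumBy (fun s => PySem.Str.slice s none (some (-1))) delta.items q := by
            simp [pvSumBy]
          rw [hsw]
          have htrans := pv_transport (fun s => PySem.Str.slice s none (some (-1))) delta.items
            ((counts.filter (fun p => decide (PySem.Str.len p.1 = max_K ∧ 0 < p.2))).map
              (fun p => (pvTk p.1 (n+1), p.2)))
            (by
              intro k
              rw [pv_sumW_items delta hndd k, hdelta k]
              exact (pv_sumBy_map (fun s => pvTk s (n+1)) _ k).symm) q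
          rw [htrans]
          unfold pvSumBy
          rw [List.map_map]
          refine congrArg List.sum (List.map_congr_left ?_)
          intro p hp
          simp only [Function.comp_def]
          rw [hdl p hp]
        have hndd' : (delta.items.foldl
            (fun (s : PySem.Dict String Int) (p : String × Int) =>
              s.insert (PySem.Str.slice p.1 none (some (-1)))
                (s.getD (PySem.Str.slice p.1 none (some (-1))) 0 + p.2)) PySem.Dict.empty).keys.Nodup := by
          refine PySem.Dict.nodup_keys_foldl_insert_key delta.items
            (fun p => PySem.Str.slice p.1 none (some (-1))) _ PySem.Dict.empty ?_
          rw [PySem.Dict.keys_empty]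
          exact List.nodup_nil
        have hkd' : ∀ x ∈ (delta.items.foldl
            (fun (s : PySem.Dict String Int) (p : String × Int) =>
              s.insert (PySem.Str.slice p.1 none (some (-1)))
                (s.getD (PySem.Str.slice p.1 none (some (-1))) 0 + p.2)) PySem.Dict.empty).keys,
            ∃ p ∈ counts.filter (fun p => decide (PySem.Str.len p.1 = max_K ∧ 0 < p.2)),
              x = pvTk p.1 n := by
          intro x hx
          rcases (pv_bump_keys_mem delta.items (fun p => PySem.Str.slice p.1 none (some (-1)))
            (fun p => p.2) PySem.Dict.empty x).1 hx with h | ⟨a, ha, rfl⟩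
          · rw [PySem.Dict.keys_empty] at h; cases h
          · have h1 : a.1 ∈ delta.keys := List.mem_map_of_mem ha
            obtain ⟨r, hr, hx1⟩ := hkd a.1 h1
            exact ⟨r, hr, by rw [hx1, hdl r hr]⟩
        have hih := ih _ _ (fun q => g q + pvSumBy (fun s => pvTk s (n+1))
            (counts.filter (fun p => decide (PySem.Str.len p.1 = max_K ∧ 0 < p.2))) q)
          (by omega) hkeys' (by
            intro q
            beta_reduce
            rw [hd' q]
            omega) hdelta' hndd' hkd'
        obtain ⟨ha, hb⟩ := hih
        refine ⟨ha, fun q => ?_⟩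
        have hbq := hb q
        beta_reduce at hbq
        rw [hbq]
        simp only [pvFB]
        omega
      · -- last level: next delta is unused
        have hnz : n = 0 := by omega
        subst hnz
        simp only [if_neg hn0]
        have hfix : (delta.items.foldl
            (fun (s : PySem.Dict String Int) (_ : String × Int) => s) PySem.Dict.empty)
            = PySem.Dict.empty := List.foldl_fixed' (fun _ => rfl) delta.items
        rw [hfix]
        simp only [pvBLoop]
        refine ⟨hkeys', fun q => ?_⟩
        rw [hd' q]
        simp only [pvFB]
        omega

-- ===== bridging A's sum to B's sum =====

lemma pv_G_eq_FB (Q : List (String × Int)) :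
    ∀ (n : Nat), ∀ q, pvG Q n q = pvFB Q n q := by
  intro n
  induction n with
  | zero =>
    intro q
    simp only [pvG, pvFB]
    rw [show (((0:Nat) : Int) + 1) = 1 from by norm_num]
    rw [show PySem.List.pyRange 1 1 1 = [] from pv_pyRange_nil 1 (by norm_num)]
    simp
  | succ n ih =>
    intro q
    have hsplit : PySem.List.pyRange 1 (((n+1 : Nat) : Int) + 1) 1
        = PySem.List.pyRange 1 (((n : Nat) : Int) + 1) 1 ++ [((n : Nat) : Int) + 1] := by
      have h1 : (((n+1 : Nat) : Int) + 1) = (((n : Nat) : Int) + 1) + 1 := by push_cast; ring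
      rw [h1]
      exact PySem.List.pyRange_one_succ_right (by omega)
    simp only [pvG, pvFB]
    rw [hsplit]
    have hexp : ∀ p : String × Int,
        ((PySem.List.pyRange 1 (((n : Nat) : Int) + 1) 1 ++ [((n : Nat) : Int) + 1]).map
          (fun i => if PySem.Str.slice p.1 none (some i) = q then p.2 else 0)).sum
        = ((PySem.List.pyRange 1 (((n : Nat) : Int) + 1) 1).map
          (fun i => if PySem.Str.slice p.1 none (some i) = q then p.2 else 0)).sum
          + (if PySem.Str.slice p.1 none (some (((n : Nat) : Int) + 1)) = q then p.2 else 0) := by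
      intro p
      rw [List.map_append, List.sum_append]
      simp
    rw [List.map_congr_left (fun p _ => hexp p), PySem.List.sum_map_add_int]
    have hG := ih q
    simp only [pvG] at hG
    rw [hG]
    have hlast : (Q.map (fun p =>
        if PySem.Str.slice p.1 none (some (((n : Nat) : Int) + 1)) = q then p.2 else 0)).sum
        = pvSumBy (fun s => pvTk s (n + 1)) Q q := by
      unfold pvSumBy
      refine congrArg List.sum (List.map_congr_left ?_)
      intro p _
      rw [pv_slice_tk p.1 (((n : Nat) : Int) + 1) (by omega)]
      rw [show ((((n : Nat) : Int) + 1)).toNat = n + 1 from by omega]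
    rw [hlast]
    omega

lemma pv_TA_zero_of_nonpos (counts : List (String × Int)) (max_K : Int) (hmk : max_K ≤ 0)
    (k q : String) : pvTA counts max_K k q = 0 := by
  rw [pvTA]
  split
  · next hcond =>
    have h1 := hcond.1
    have h2 : (0:Int) ≤ PySem.Str.len k := by rw [PySem.Str.len_eq]; positivity
    rw [pv_pyRange_nil (PySem.Str.len k) (by omega)]
    simp
  · rfl

lemma pv_final_sum (counts : List (String × Int)) (max_K : Int)
    (hnd : (counts.map Prod.fst).Nodup) (q : String) :
    (((PySem.Dict.mk counts).keys).map (fun k => pvTA counts max_K k q)).sum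
      = pvFB (counts.filter (fun p => decide (PySem.Str.len p.1 = max_K ∧ 0 < p.2)))
          ((max_K - 1).toNat) q := by
  by_cases hmk : max_K ≤ 0
  · have hz : ∀ k ∈ (PySem.Dict.mk counts).keys, pvTA counts max_K k q = 0 :=
      fun k _ => pv_TA_zero_of_nonpos counts max_K hmk k q
    rw [List.map_congr_left hz]
    have hm0 : (max_K - 1).toNat = 0 := by omega
    rw [hm0]
    simp only [pvFB]
    refine List.sum_eq_zero ?_
    intro x hx
    rcases List.mem_map.1 hx with ⟨y, _, rfl⟩
    rfl
  · have hmi : (((max_K - 1).toNat : Int)) + 1 = max_K := by omega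
    have hptw : ∀ p ∈ counts, pvTA counts max_K p.1 q
        = (if (decide (PySem.Str.len p.1 = max_K ∧ 0 < p.2)) = true then
            ((PySem.List.pyRange 1 ((((max_K - 1).toNat : Int)) + 1) 1).map
              (fun i => if PySem.Str.slice p.1 none (some i) = q then p.2 else 0)).sum
          else 0) := by
      intro p hp
      have hgd : (PySem.Dict.mk counts).getD p.1 0 = p.2 :=
        PySem.Dict.getD_of_mem_items (PySem.Dict.mk counts) hp
          (by rw [PySem.Dict.keys_mk]; exact hnd) 0
      rw [pvTA, hgd]
      by_cases hcond : PySem.Str.len p.1 = max_K ∧ 0 < p.2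
      · rw [if_pos hcond, if_pos (by simp only [decide_eq_true_eq]; exact hcond)]
        have hb : PySem.Str.len p.1 = ((max_K - 1).toNat : Int) + 1 := by
          rw [hcond.1]; omega
        rw [hb]
      · rw [if_neg hcond, if_neg (by simp only [decide_eq_true_eq]; exact hcond)]
    have hkm : (PySem.Dict.mk counts).keys = counts.map Prod.fst := PySem.Dict.keys_mk counts
    rw [hkm, List.map_map]
    have hcomp : ((fun k => pvTA counts max_K k q) ∘ Prod.fst)
        = fun p : String × Int => pvTA counts max_K p.1 q := rfl
    rw [hcomp, List.map_congr_left hptw, ← pv_sum_filter _ _ counts]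
    have hG : ((counts.filter (fun p => decide (PySem.Str.len p.1 = max_K ∧ 0 < p.2))).map
        (fun p => ((PySem.List.pyRange 1 ((((max_K - 1).toNat : Int)) + 1) 1).map
          (fun i => if PySem.Str.slice p.1 none (some i) = q then p.2 else 0)).sum)).sum
        = pvG (counts.filter (fun p => decide (PySem.Str.len p.1 = max_K ∧ 0 < p.2)))
            ((max_K - 1).toNat) q := rfl
    rw [hG]
    exact pv_G_eq_FB _ _ q

-- ===== VERDICT (by name: the statement is the Claim_ definition above) =====
theorem harvest_counts_from_K_spec : Claim_equal_harvest_counts_from_K := by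
  intro counts max_K _ hpre
  obtain ⟨hnd, hpre2⟩ := hpre
  unfold Spec_harvest_counts_from_K
  have hndk : (PySem.Dict.mk counts).keys.Nodup := by
    rw [PySem.Dict.keys_mk]; exact hnd
  -- A's result, characterised
  have hA := pv_aOuter counts max_K hnd hpre2 ((PySem.Dict.mk counts).keys)
    (PySem.Dict.mk counts) (fun _ => 0) (fun k hk => hk) rfl
    (fun q => (add_zero _).symm) (fun _ _ => rfl)
  obtain ⟨hAkeys, hAget⟩ := hA
  have hArfl : harvest_counts_from_K counts max_K
      = (((PySem.Dict.mk counts).keys).foldl (fun d kmer =>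
          if PySem.Str.len kmer = max_K ∧ 0 < d.getD kmer 0 then
            (PySem.List.pyRange 1 (PySem.Str.len kmer) 1).foldl
              (fun dd i => dd.modify (PySem.Str.slice kmer none (some i)) 0 (· + d.getD kmer 0)) d
          else d) (PySem.Dict.mk counts)).items := rfl
  -- B's delta, characterised
  have hdelta0 : (((PySem.Dict.mk counts).items).foldl
      (fun dl p =>
        if PySem.Str.len p.1 = max_K ∧ 0 < p.2 then
          dl.insert (PySem.Str.slice p.1 none (some (-1)))
            (dl.getD (PySem.Str.slice p.1 none (some (-1))) 0 + p.2)
        else dl) PySem.Dict.empty)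
      = ((counts.filter (fun p => decide (PySem.Str.len p.1 = max_K ∧ 0 < p.2))).foldl
        (fun dl p => dl.insert (PySem.Str.slice p.1 none (some (-1)))
          (dl.getD (PySem.Str.slice p.1 none (some (-1))) 0 + p.2)) PySem.Dict.empty) := by
    rw [List.foldl_filter]
    have hfun : (fun (dl : PySem.Dict String Int) (p : String × Int) =>
        if PySem.Str.len p.1 = max_K ∧ 0 < p.2 then
          dl.insert (PySem.Str.slice p.1 none (some (-1)))
            (dl.getD (PySem.Str.slice p.1 none (some (-1))) 0 + p.2)
        else dl)
        = (fun (dl : PySem.Dict String Int) (p : String × Int) =>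
          if (decide (PySem.Str.len p.1 = max_K ∧ 0 < p.2)) = true then
            dl.insert (PySem.Str.slice p.1 none (some (-1)))
              (dl.getD (PySem.Str.slice p.1 none (some (-1))) 0 + p.2)
          else dl) := by
      funext dl p
      by_cases h : PySem.Str.len p.1 = max_K ∧ 0 < p.2 <;> simp [h]
    rw [hfun]
  have hBrfl : harvest_counts_from_K_alt counts max_K
      = (pvBLoop (PySem.Dict.mk counts)
        (((PySem.Dict.mk counts).items).foldl
          (fun dl p =>
            if PySem.Str.len p.1 = max_K ∧ 0 < p.2 then
              dl.insert (PySem.Str.slice p.1 none (some (-1)))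
                (dl.getD (PySem.Str.slice p.1 none (some (-1))) 0 + p.2)
            else dl) PySem.Dict.empty) (max_K - 1).toNat).items := rfl
  by_cases hmk : max_K ≤ 0
  · -- trivial fuel: B returns the input dict, A adds nothing
    have hm0 : (max_K - 1).toNat = 0 := by omega
    have hB0 : harvest_counts_from_K_alt counts max_K = (PySem.Dict.mk counts).items := by
      rw [hBrfl, hm0]
      rfl
    rw [hArfl, hB0]
    have hAnd : (((PySem.Dict.mk counts).keys).foldl (fun d kmer =>
        if PySem.Str.len kmer = max_K ∧ 0 < d.getD kmer 0 then
          (PySem.List.pyRange 1 (PySem.Str.len kmer) 1).foldl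
            (fun dd i => dd.modify (PySem.Str.slice kmer none (some i)) 0 (· + d.getD kmer 0)) d
        else d) (PySem.Dict.mk counts)).keys.Nodup := by
      rw [hAkeys]; exact hndk
    rw [PySem.Dict.items_eq_map_keys _ hAnd 0,
      PySem.Dict.items_eq_map_keys (PySem.Dict.mk counts) hndk 0, hAkeys]
    refine List.map_congr_left ?_
    intro k hk
    refine congrArg (Prod.mk k) ?_
    have hget := hAget k
    beta_reduce at hget
    rw [hget, pv_final_sum counts max_K hnd k, hm0]
    simp [pvFB]
  · -- 1 ≤ max_K: run the loop characterisation
    have hdl0 : ∀ p ∈ counts.filter (fun p => decide (PySem.Str.len p.1 = max_K ∧ 0 < p.2)),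
        PySem.Str.slice p.1 none (some (-1)) = pvTk p.1 (max_K - 1).toNat := by
      intro p hp
      have hlen := (pv_Q_mem counts max_K p hp).2.1
      rw [PySem.Str.len_eq] at hlen
      rw [pv_slice_dropLast, pvTk, List.dropLast_eq_take]
      have hlm : p.1.toList.length - 1 = (max_K - 1).toNat := by omega
      rw [hlm]
    have hd0 : ∀ q, ((counts.filter (fun p => decide (PySem.Str.len p.1 = max_K ∧ 0 < p.2))).foldl
        (fun dl p => dl.insert (PySem.Str.slice p.1 none (some (-1)))
          (dl.getD (PySem.Str.slice p.1 none (some (-1))) 0 + p.2)) PySem.Dict.empty).getD q 0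
        = pvSumBy (fun s => pvTk s (max_K - 1).toNat)
            (counts.filter (fun p => decide (PySem.Str.len p.1 = max_K ∧ 0 < p.2))) q := by
      intro q
      rw [pv_bump_getD (counts.filter (fun p => decide (PySem.Str.len p.1 = max_K ∧ 0 < p.2)))
        (fun p : String × Int => PySem.Str.slice p.1 none (some (-1)))
        (fun p : String × Int => p.2) PySem.Dict.empty q, PySem.Dict.getD_empty, zero_add]
      unfold pvSumBy
      refine congrArg List.sum (List.map_congr_left ?_)
      intro p hp
      rw [hdl0 p hp]
    have hnd0 : ((counts.filter (fun p => decide (PySem.Str.len p.1 = max_K ∧ 0 < p.2))).foldl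
        (fun dl p => dl.insert (PySem.Str.slice p.1 none (some (-1)))
          (dl.getD (PySem.Str.slice p.1 none (some (-1))) 0 + p.2)) PySem.Dict.empty).keys.Nodup := by
      refine PySem.Dict.nodup_keys_foldl_insert_key _
        (fun p : String × Int => PySem.Str.slice p.1 none (some (-1)))
        (fun s p => s.getD (PySem.Str.slice p.1 none (some (-1))) 0 + p.2) PySem.Dict.empty ?_
      rw [PySem.Dict.keys_empty]
      exact List.nodup_nil
    have hkd0 : ∀ x ∈ ((counts.filter (fun p => decide (PySem.Str.len p.1 = max_K ∧ 0 < p.2))).foldl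
        (fun dl p => dl.insert (PySem.Str.slice p.1 none (some (-1)))
          (dl.getD (PySem.Str.slice p.1 none (some (-1))) 0 + p.2)) PySem.Dict.empty).keys,
        ∃ p ∈ counts.filter (fun p => decide (PySem.Str.len p.1 = max_K ∧ 0 < p.2)),
          x = pvTk p.1 (max_K - 1).toNat := by
      intro x hx
      rcases (pv_bump_keys_mem _ (fun p : String × Int => PySem.Str.slice p.1 none (some (-1)))
        (fun p => p.2) PySem.Dict.empty x).1 hx with h | ⟨a, ha, rfl⟩
      · rw [PySem.Dict.keys_empty] at h; cases h
      · exact ⟨a, ha, (hdl0 a ha)⟩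
    have hB := pv_bloop counts max_K hnd hpre2 (max_K - 1).toNat (PySem.Dict.mk counts) _
      (fun _ => 0) (by omega) rfl (fun q => (add_zero _).symm) hd0 hnd0 hkd0
    obtain ⟨hBkeys, hBget⟩ := hB
    rw [hArfl, hBrfl, hdelta0]
    have hAnd : (((PySem.Dict.mk counts).keys).foldl (fun d kmer =>
        if PySem.Str.len kmer = max_K ∧ 0 < d.getD kmer 0 then
          (PySem.List.pyRange 1 (PySem.Str.len kmer) 1).foldl
            (fun dd i => dd.modify (PySem.Str.slice kmer none (some i)) 0 (· + d.getD kmer 0)) d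
        else d) (PySem.Dict.mk counts)).keys.Nodup := by
      rw [hAkeys]; exact hndk
    have hBnd : (pvBLoop (PySem.Dict.mk counts)
        ((counts.filter (fun p => decide (PySem.Str.len p.1 = max_K ∧ 0 < p.2))).foldl
          (fun dl p => dl.insert (PySem.Str.slice p.1 none (some (-1)))
            (dl.getD (PySem.Str.slice p.1 none (some (-1))) 0 + p.2)) PySem.Dict.empty)
        (max_K - 1).toNat).keys.Nodup := by
      rw [hBkeys]; exact hndk
    rw [PySem.Dict.items_eq_map_keys _ hAnd 0, PySem.Dict.items_eq_map_keys _ hBnd 0,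
      hAkeys, hBkeys]
    refine List.map_congr_left ?_
    intro k hk
    refine congrArg (Prod.mk k) ?_
    have hga := hAget k
    beta_reduce at hga
    have hgb := hBget k
    beta_reduce at hgb
    rw [hga, hgb, pv_final_sum counts max_K hnd k]
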